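-- pv_equiv track=rewrite | github.com/Anisoze/-ourse2 | Course2.py | len_from_LL_code
-- ===== SOURCE A (Python) =====
-- def len_from_LL_code(val, extra):                     #get length from symbols and extra bits  from LL table from RFC 1951          #reverse
--
--     if(val<265):           #no extra bits
--         return val-257+3
--
--     elif(val==285):
--         return 258
--
--     else:               #with extra bits
--         k=(val-265)//4
--         pos=(val-265)%4
--         L=11
--         for i in range(k):
--             L+=(2**(3+i))
--         for i in range(pos):
--             L+=2**(1+k)
--
--         return L+extra
-- ===== SOURCE B (Python) =====
-- def len_from_LL_code(val, extra):
--     if val == 285: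
--         return 258
--     sym = val - 257
--     if sym < 8:
--         return sym + 3
--     q, r = divmod(sym - 8, 4)
--     return 3 + (4 + r) * 2 ** (q + 1) + extra
-- ===== Notes on version B (the rewrite author's own statement) =====
-- stated objective: simpler
-- what changed: Replaces A's two accumulation loops with a single loop-free product formula 3 + (4+r)*2**(q+1) + extra over (q,r) = divmod(val-265,4), with the val==285 special case hoisted first and the base case expressed through a symbol offset sym = val-257.
import Mathlib
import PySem

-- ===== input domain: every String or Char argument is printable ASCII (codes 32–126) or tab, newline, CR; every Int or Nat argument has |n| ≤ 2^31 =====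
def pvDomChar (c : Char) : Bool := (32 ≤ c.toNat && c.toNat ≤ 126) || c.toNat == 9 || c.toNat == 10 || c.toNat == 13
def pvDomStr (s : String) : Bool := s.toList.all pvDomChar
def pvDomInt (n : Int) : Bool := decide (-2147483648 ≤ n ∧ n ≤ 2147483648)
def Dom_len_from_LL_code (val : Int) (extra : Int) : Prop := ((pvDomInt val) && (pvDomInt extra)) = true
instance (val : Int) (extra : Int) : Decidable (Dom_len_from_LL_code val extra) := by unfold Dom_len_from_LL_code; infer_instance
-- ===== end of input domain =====

-- B hoists the 285 case, works on the symbol offset sym = val - 257, and replaces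
-- A's two accumulation loops with the loop-free formula 3 + (4+r)*2^(q+1) + extra
-- over (q, r) = divmod(sym - 8, 4)  (objective: simpler).

-- ===== PORT A =====
def len_from_LL_code (val : Int) (extra : Int) : Int :=
  if val < 265 then val - 257 + 3
  else if val = 285 then 258
  else
    let k := PySem.Int.floordiv (val - 265) 4
    let pos := PySem.Int.mod (val - 265) 4
    let L : Int := 11
    let L := (PySem.List.pyRange 0 k 1).foldl (fun L i => L + 2 ^ (3 + i).toNat) L
    let L := (PySem.List.pyRange 0 pos 1).foldl (fun L _ => L + 2 ^ (1 + k).toNat) L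
    L + extra

-- ===== PORT B =====
def len_from_LL_code_alt (val : Int) (extra : Int) : Int :=
  if val = 285 then 258
  else
    let sym := val - 257
    if sym < 8 then sym + 3
    else
      -- divmod(sym - 8, 4): the divisor is the literal 4, so divmod? is always some
      match PySem.Int.divmod? (sym - 8) 4 with
      | some (q, r) => 3 + (4 + r) * 2 ^ (q + 1).toNat + extra
      | none => 0

-- ===== PRECONDITION & SPEC =====
def Spec_len_from_LL_code (val : Int) (extra : Int) (out : Int) : Prop := out = len_from_LL_code_alt val extra
instance (val : Int) (extra : Int) (out : Int) : Decidable (Spec_len_from_LL_code val extra out) := by unfold Spec_len_from_LL_code; infer_instance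

-- ===== CLAIM (what is proved, stated in full; the proofs are below) =====
def Claim_equal_len_from_LL_code : Prop := ∀ (val : Int) (extra : Int), Dom_len_from_LL_code val extra → Spec_len_from_LL_code val extra (len_from_LL_code val extra)

-- ===== LEMMAS AND PROOFS =====

-- A's first loop: summing 2^(3+i) for i in range(n) onto c gives c + 2^(3+n) - 8.
theorem loop1_eq (c : Int) (n : Nat) :
    (PySem.List.pyRange 0 (n : Int) 1).foldl (fun L i => L + 2 ^ (3 + i).toNat) c
      = c + 2 ^ (3 + n) - 8 := by
  induction n generalizing c with
  | zero => simp [PySem.List.pyRange_one_eq_nil]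
  | succ n ih =>
    have h : ((n + 1 : Nat) : Int) = (n : Int) + 1 := by push_cast; ring
    rw [h, PySem.List.pyRange_one_succ_right (by positivity), List.foldl_append, ih]
    have h2 : (3 + (n : Int)).toNat = 3 + n := by omega
    simp only [List.foldl, h2]
    have : (2 : Int) ^ (3 + (n + 1)) = 2 ^ (3 + n) * 2 := by ring
    rw [this]; ring

-- A's second loop: adding the constant 2^(1+k).toNat n times onto c.
theorem loop2_eq (c k : Int) (n : Nat) :
    (PySem.List.pyRange 0 (n : Int) 1).foldl (fun L _ => L + 2 ^ (1 + k).toNat) c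
      = c + (n : Int) * 2 ^ (1 + k).toNat := by
  induction n generalizing c with
  | zero => simp [PySem.List.pyRange_one_eq_nil]
  | succ n ih =>
    have h : ((n + 1 : Nat) : Int) = (n : Int) + 1 := by push_cast; ring
    rw [h, PySem.List.pyRange_one_succ_right (by positivity), List.foldl_append, ih]
    simp only [List.foldl]
    ring

-- ===== VERDICT (by name: the statement is the Claim_ definition above) =====
theorem len_from_LL_code_spec : Claim_equal_len_from_LL_code := by
  intro val extra _
  unfold Spec_len_from_LL_code len_from_LL_code len_from_LL_code_alt
  by_cases h285 : val = 285
  · subst h285; norm_num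
  · by_cases hlt : val < 265
    · rw [if_pos hlt, if_neg h285, if_pos (by omega : val - 257 < 8)]
    · rw [if_neg hlt, if_neg h285, if_neg h285, if_neg (by omega : ¬ val - 257 < 8)]
      have hd : val - 257 - 8 = val - 265 := by ring
      rw [hd]
      have hdm : PySem.Int.divmod? (val - 265) 4
          = some (PySem.Int.floordiv (val - 265) 4, PySem.Int.mod (val - 265) 4) := by
        simp [PySem.Int.divmod?, PySem.Int.floordiv, PySem.Int.mod]
      rw [hdm]
      set k := PySem.Int.floordiv (val - 265) 4 with hk
      set pos := PySem.Int.mod (val - 265) 4 with hpos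
      have hk0 : 0 ≤ k := by
        rw [hk, PySem.Int.floordiv_eq_ediv_of_pos (by norm_num)]
        exact Int.ediv_nonneg (by omega) (by norm_num)
      have hpos0 : 0 ≤ pos := by
        rw [hpos, PySem.Int.mod_eq_emod_of_pos (by norm_num)]
        exact Int.emod_nonneg _ (by norm_num)
      obtain ⟨K, hK⟩ : ∃ K : Nat, k = (K : Int) := ⟨k.toNat, (Int.toNat_of_nonneg hk0).symm⟩
      obtain ⟨P, hP⟩ : ∃ P : Nat, pos = (P : Int) := ⟨pos.toNat, (Int.toNat_of_nonneg hpos0).symm⟩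
      rw [hK, hP]
      dsimp only
      rw [loop1_eq, loop2_eq]
      have h1 : ((1 : Int) + (K : Int)).toNat = K + 1 := by omega
      have h2 : ((K : Int) + 1).toNat = K + 1 := by omega
      rw [h1, h2]
      have h3 : (2 : Int) ^ (3 + K) = 4 * 2 ^ (K + 1) := by rw [pow_add, pow_add]; ring
      rw [h3]
      ring
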